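-- pv_equiv track=rewrite | github.com/Nostoi/rom24-quickmud-python | mud/utils/string_editor.py | string_lineadd
-- ===== SOURCE A (Python) =====
-- def string_lineadd(string: str, newstr: str, line: int) -> str:
--     """Insert newstr as the 1-indexed line N.
--
--     Mirrors ROM ``string_lineadd`` (src/string.c:607-645). Inserts
--     *newstr* as the line at position *line* (1-indexed). The inserted
--     line gets a ``\n\r`` suffix.
--
--     Used by ``.li`` and ``.lr`` dot-commands.
--     """
--
--     buf: list[str] = []
--     cnt = 1
--     done = False
--     i = 0
--
--     # Iterate through string; continue past end if insertion hasn't happened yet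
--     # and we've reached the target line number
--     while i < len(string):
--         # Check if we should insert at this line number
--         if cnt == line and not done:
--             buf.append(newstr)
--             buf.append("\n\r")
--             cnt += 1
--             done = True
--
--         c = string[i]
--         buf.append(c)
--
--         if c == "\n":
--             if i + 1 < len(string) and string[i + 1] == "\r":
--                 buf.append(string[i + 1])
--                 i += 1
--             cnt += 1
--
--         i += 1
--
--     # After exhausting the string, if insertion hasn't happened and we've
--     # reached the target line, insert now (for appending past the end)
--     if cnt == line and not done:
--         buf.append(newstr)
--         buf.append("\n\r")
--
--     return "".join(buf)
-- ===== SOURCE B (Python) =====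
-- def string_lineadd(string: str, newstr: str, line: int) -> str:
--     """Insert newstr as the 1-indexed line N (inserted line gets a "\n\r" suffix).
--
--     Decomposition: split the string once into per-line segments (each segment
--     keeps its "\n" / "\n\r" terminator; a trailing, possibly empty, segment is
--     always present), then a single list.insert places the new line, and join.
--     """
--     lines = []
--     start = 0
--     i = 0
--     n = len(string)
--     while i < n:
--         if string[i] == "\n":
--             i += 1
--             if i < n and string[i] == "\r":
--                 i += 1
--             lines.append(string[start:i])
--             start = i
--         else:
--             i += 1
--     lines.append(string[start:])
--     if 1 <= line <= len(lines):
--         lines.insert(line - 1, newstr + "\n\r")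
--     return "".join(lines)
-- ===== Notes on version B (the rewrite author's own statement) =====
-- stated objective: simpler
-- what changed: A interleaves insertion into a char-by-char accumulator guarded by cnt/done flags; B decomposes the string once into a list of terminator-carrying line segments (bulk slices), places the new line with a single list.insert, and joins.
import Mathlib
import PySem

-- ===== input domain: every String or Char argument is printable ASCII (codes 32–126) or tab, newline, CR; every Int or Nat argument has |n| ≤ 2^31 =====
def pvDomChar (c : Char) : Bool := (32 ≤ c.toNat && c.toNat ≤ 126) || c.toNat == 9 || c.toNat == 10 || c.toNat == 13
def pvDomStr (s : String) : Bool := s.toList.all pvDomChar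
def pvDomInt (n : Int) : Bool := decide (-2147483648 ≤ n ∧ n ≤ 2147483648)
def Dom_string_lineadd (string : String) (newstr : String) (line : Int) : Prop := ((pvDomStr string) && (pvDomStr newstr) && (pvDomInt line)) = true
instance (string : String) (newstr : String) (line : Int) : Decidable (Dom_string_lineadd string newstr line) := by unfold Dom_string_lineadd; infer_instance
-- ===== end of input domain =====

-- B replaces A's interleaved char accumulator (cnt/done flags deciding insertion mid-stream) by an
-- explicit list of line segments built once, a single list.insert, and a join (objective: simpler decomposition).

-- ===== PORT A =====
-- A's while loop over the string, one case per iteration shape; the '\n'-followed-by-'\r'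
-- iteration consumes both characters (Python advances i twice inside that loop body).
-- State: remaining characters, cnt, done.  The [] case is the post-loop insertion check.
def lineaddLoopA (newstr : List Char) (line : Int) : List Char → Int → Bool → List Char
  | [], cnt, dn => if cnt = line ∧ dn = false then newstr ++ ['\n', '\r'] else []
  | '\n' :: '\r' :: rest, cnt, dn =>
      (if cnt = line ∧ dn = false then newstr ++ ['\n', '\r'] else []) ++
        '\n' :: '\r' :: lineaddLoopA newstr line rest
          ((if cnt = line ∧ dn = false then cnt + 1 else cnt) + 1)
          (if cnt = line ∧ dn = false then true else dn)
  | '\n' :: rest, cnt, dn =>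
      (if cnt = line ∧ dn = false then newstr ++ ['\n', '\r'] else []) ++
        '\n' :: lineaddLoopA newstr line rest
          ((if cnt = line ∧ dn = false then cnt + 1 else cnt) + 1)
          (if cnt = line ∧ dn = false then true else dn)
  | c :: rest, cnt, dn =>
      (if cnt = line ∧ dn = false then newstr ++ ['\n', '\r'] else []) ++
        c :: lineaddLoopA newstr line rest
          (if cnt = line ∧ dn = false then cnt + 1 else cnt)
          (if cnt = line ∧ dn = false then true else dn)

def string_lineadd (string : String) (newstr : String) (line : Int) : String :=
  String.mk (lineaddLoopA newstr.toList line string.toList 1 false)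

-- ===== PORT B =====
-- B's scanning while loop: cur is the current segment string[start:i]; on '\n' (absorbing an
-- immediately following '\r') the segment is closed; a trailing segment is always appended.
def lineaddSegsB : List Char → List Char → List (List Char)
  | cur, [] => [cur]
  | cur, '\n' :: '\r' :: rest => (cur ++ ['\n', '\r']) :: lineaddSegsB [] rest
  | cur, '\n' :: rest => (cur ++ ['\n']) :: lineaddSegsB [] rest
  | cur, c :: rest => lineaddSegsB (cur ++ [c]) rest

def string_lineadd_alt (string : String) (newstr : String) (line : Int) : String :=
  let lines := lineaddSegsB [] string.toList
  let lines2 := if 1 ≤ line ∧ line ≤ (lines.length : Int) then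
      PySem.List.insert lines (line - 1) (newstr.toList ++ ['\n', '\r'])
    else lines
  String.mk (PySem.Chars.join [] lines2)

-- ===== PRECONDITION & SPEC =====
def Spec_string_lineadd (string : String) (newstr : String) (line : Int) (out : String) : Prop := out = string_lineadd_alt string newstr line
instance (string : String) (newstr : String) (line : Int) (out : String) : Decidable (Spec_string_lineadd string newstr line out) := by unfold Spec_string_lineadd; infer_instance

-- ===== CLAIM (what is proved, stated in full; the proofs are below) =====
def Claim_equal_string_lineadd : Prop := ∀ (string : String) (newstr : String) (line : Int), Dom_string_lineadd string newstr line → Spec_string_lineadd string newstr line (string_lineadd string newstr line)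

-- ===== LEMMAS AND PROOFS =====

lemma loopA_done (new : List Char) (line : Int) :
    ∀ (s : List Char) (cnt : Int), lineaddLoopA new line s cnt true = s := by
  suffices h : ∀ (cur s : List Char) (cnt : Int), lineaddLoopA new line s cnt true = s from fun s => h [] s
  intro cur s
  induction cur, s using lineaddSegsB.induct with
  | case1 => intro cnt; simp [lineaddLoopA]
  | case2 cur rest ih => intro cnt; simp [lineaddLoopA, ih]
  | case3 cur rest h ih => intro cnt; rw [lineaddLoopA] <;> simp_all
  | case4 cur c rest h1 h2 ih => intro cnt; rw [lineaddLoopA] <;> simp_all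

lemma segsB_ne_nil (cur s : List Char) : lineaddSegsB cur s ≠ [] := by
  fun_induction lineaddSegsB cur s <;> simp_all

lemma segsB_flatten (cur s : List Char) : (lineaddSegsB cur s).flatten = cur ++ s := by
  fun_induction lineaddSegsB cur s <;> simp_all

lemma segsB_append (cur s : List Char) : ∀ cur' : List Char,
    lineaddSegsB (cur' ++ cur) s
      = (cur' ++ (lineaddSegsB cur s).headD []) :: (lineaddSegsB cur s).tail := by
  induction cur, s using lineaddSegsB.induct with
  | case1 cur => intro cur'; simp [lineaddSegsB]
  | case2 cur rest ih => intro cur'; rw [lineaddSegsB, lineaddSegsB] <;> first | exact h | simp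
  | case3 cur rest h ih => intro cur'; rw [lineaddSegsB, lineaddSegsB] <;> first | exact h | simp
  | case4 cur c rest h1 h2 ih =>
    intro cur'
    have e1 : lineaddSegsB (cur' ++ cur) (c :: rest) = lineaddSegsB ((cur' ++ cur) ++ [c]) rest := by
      rw [lineaddSegsB] <;> first | exact h1 | exact h2 | rfl
    have e2 : lineaddSegsB cur (c :: rest) = lineaddSegsB (cur ++ [c]) rest := by
      rw [lineaddSegsB] <;> first | exact h1 | exact h2 | rfl
    rw [e1, e2, List.append_assoc, ih]

lemma loopA_main (new : List Char) (line : Int) :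
    ∀ (cur s : List Char) (cnt : Int), lineaddLoopA new line s cnt false =
      if cnt ≤ line ∧ line ≤ cnt + (((lineaddSegsB [] s).length : Int) - 1) then
        ((lineaddSegsB [] s).take (line - cnt).toNat).flatten ++ new ++
          '\n' :: '\r' :: ((lineaddSegsB [] s).drop (line - cnt).toNat).flatten
      else s := by
  intro cur s
  induction cur, s using lineaddSegsB.induct with
  | case1 cur =>
    intro cnt
    by_cases hc : cnt = line
    · simp [lineaddLoopA, lineaddSegsB, hc]
    · simp [lineaddLoopA, lineaddSegsB, hc]
      omega
  | case2 cur rest ih =>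
    intro cnt
    have hs : lineaddSegsB ([] : List Char) ('\n' :: '\r' :: rest) = ['\n','\r'] :: lineaddSegsB [] rest := by rw [lineaddSegsB]; rfl
    have hlen : 0 < (lineaddSegsB [] rest).length := List.length_pos_of_ne_nil (segsB_ne_nil _ _)
    by_cases hc : cnt = line
    · subst hc
      rw [lineaddLoopA]
      rw [hs]
      rw [if_pos (by simp)]
      simp [loopA_done, segsB_flatten]
    · rw [lineaddLoopA]
      rw [hs]
      simp only [hc, false_and, if_neg, ite_false, List.nil_append, if_false]
      rw [ih (cnt + 1)]
      by_cases hcond : cnt + 1 ≤ line ∧ line ≤ (cnt + 1) + (((lineaddSegsB [] rest).length : Int) - 1)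
      · rw [if_pos hcond, if_pos (by constructor <;> [omega; (simp; omega)])]
        have hj : (line - cnt).toNat = (line - (cnt+1)).toNat + 1 := by omega
        rw [hj]
        simp
      · rw [if_neg hcond, if_neg (by simp; omega)]
  | case3 cur rest h ih =>
    intro cnt
    have hs : lineaddSegsB ([] : List Char) ('\n' :: rest) = ['\n'] :: lineaddSegsB [] rest := by
      rw [lineaddSegsB] <;> first | exact h | rfl
    have hla : ∀ (cnt : Int) (dn : Bool), lineaddLoopA new line ('\n' :: rest) cnt dn =
        (if cnt = line ∧ dn = false then new ++ ['\n', '\r'] else []) ++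
          '\n' :: lineaddLoopA new line rest
            ((if cnt = line ∧ dn = false then cnt + 1 else cnt) + 1)
            (if cnt = line ∧ dn = false then true else dn) := by
      intro cnt dn; rw [lineaddLoopA] <;> first | exact h | rfl
    by_cases hc : cnt = line
    · subst hc
      rw [hla, hs, if_pos (by simp)]
      simp [loopA_done, segsB_flatten]
    · rw [hla, hs]
      simp only [hc, false_and, ite_false, List.nil_append]
      rw [ih (cnt + 1)]
      by_cases hcond : cnt + 1 ≤ line ∧ line ≤ (cnt + 1) + (((lineaddSegsB [] rest).length : Int) - 1)
      · rw [if_pos hcond, if_pos (by constructor <;> [omega; (simp; omega)])]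
        have hj : (line - cnt).toNat = (line - (cnt + 1)).toNat + 1 := by omega
        rw [hj]
        simp
      · rw [if_neg hcond, if_neg (by simp; omega)]
  | case4 cur c rest h1 h2 ih =>
    intro cnt
    obtain ⟨h0, t0, hrest⟩ := List.exists_cons_of_ne_nil (segsB_ne_nil ([] : List Char) rest)
    have hseq : lineaddSegsB ([] : List Char) (c :: rest) = (c :: h0) :: t0 := by
      have e : lineaddSegsB ([] : List Char) (c :: rest) = lineaddSegsB [c] rest := by
        rw [lineaddSegsB] <;> first | exact h1 | exact h2 | rfl
      have e2 := segsB_append [] rest [c]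
      rw [hrest] at e2
      simp at e2
      rw [e, e2]
    have hla : ∀ (cnt : Int) (dn : Bool), lineaddLoopA new line (c :: rest) cnt dn =
        (if cnt = line ∧ dn = false then new ++ ['\n', '\r'] else []) ++
          c :: lineaddLoopA new line rest
            (if cnt = line ∧ dn = false then cnt + 1 else cnt)
            (if cnt = line ∧ dn = false then true else dn) := by
      intro cnt dn; rw [lineaddLoopA] <;> first | exact h1 | exact h2 | rfl
    by_cases hc : cnt = line
    · subst hc
      rw [hla, if_pos (by simp)]
      have hflat := segsB_flatten ([] : List Char) (c :: rest)
      rw [hseq] at hflat ⊢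
      rw [if_pos (And.intro (le_refl cnt) (by simp))]
      simp [loopA_done, hflat]
    · rw [hla]
      simp only [hc, false_and, ite_false, List.nil_append]
      rw [ih cnt, hseq, hrest]
      by_cases hcond : cnt ≤ line ∧ line ≤ cnt + (((h0 :: t0).length : Int) - 1)
      · rw [if_pos hcond, if_pos (by simp at hcond ⊢; omega)]
        obtain ⟨k, hk⟩ : ∃ k, (line - cnt).toNat = k + 1 := ⟨(line - cnt).toNat - 1, by omega⟩
        rw [hk]
        simp
      · rw [if_neg hcond, if_neg (by simp at hcond ⊢; omega)]

lemma join_nil_flatten (parts : List (List Char)) :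
    PySem.Chars.join [] parts = parts.flatten := by
  unfold PySem.Chars.join
  induction parts with
  | nil => rfl
  | cons p ps ih =>
    cases ps with
    | nil => simp [List.intercalate]
    | cons q qs =>
      simp [List.intercalate, List.intersperse] at ih ⊢
      exact ih

lemma lineadd_eq_alt (string newstr : String) (line : Int) :
    string_lineadd string newstr line = string_lineadd_alt string newstr line := by
  unfold string_lineadd string_lineadd_alt
  dsimp only
  rw [loopA_main newstr.toList line [] string.toList 1, join_nil_flatten]
  have hne := segsB_ne_nil ([] : List Char) string.toList
  have hlen : 0 < (lineaddSegsB [] string.toList).length := List.length_pos_of_ne_nil hne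
  by_cases hcond : 1 ≤ line ∧ line ≤ ((lineaddSegsB [] string.toList).length : Int)
  · rw [if_pos (by constructor <;> [omega; omega]), if_pos hcond]
    have hp : line - 1 = (((line - 1).toNat : Nat) : Int) := by omega
    rw [hp, PySem.List.insert_natCast _ _ _ (by omega)]
    simp [List.flatten_append]
  · rw [if_neg (by omega), if_neg hcond, segsB_flatten]
    rfl

-- ===== VERDICT (by name: the statement is the Claim_ definition above) =====
theorem string_lineadd_spec : Claim_equal_string_lineadd := by
  intro string newstr line _
  unfold Spec_string_lineadd
  exact lineadd_eq_alt string newstr line
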